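-- pv_equiv track=rewrite | github.com/arsamigullin/problem_solving_python | leet/Stack/How_to_find_maximum_number_of_groups_needed_to_sort_an_Array.py | solve
-- ===== SOURCE A (Python) =====
-- def solve(A):
--     stack = [A[0]]
--     for i in range(1, len(A)):
--         if stack[-1]<=A[i]:
--             stack.append(A[i])
--         elif stack[-1] > A[i]:
--             last = stack[-1]
--             while stack and stack[-1] > A[i]:
--                 stack.pop()
--             stack.append(last)
--     return len(stack)
-- ===== SOURCE B (Python) =====
-- def solve(A):
--     stack = [A[0]]
--     for x in A[1:]:
--         last = stack[-1]
--         if last <= x: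
--             stack.append(x)
--         else:
--             lo, hi = 0, len(stack)
--             while lo < hi:
--                 mid = (lo + hi) // 2
--                 if stack[mid] <= x:
--                     lo = mid + 1
--                 else:
--                     hi = mid
--             del stack[lo:]
--             stack.append(last)
--     return len(stack)
-- ===== Notes on version B (the rewrite author's own statement) =====
-- stated objective: alternative
-- what changed: The inner one-by-one pop-while loop over the (always sorted) stack is replaced by a binary search for the cut point followed by a single truncation, keeping the forward pass.
import Mathlib
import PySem

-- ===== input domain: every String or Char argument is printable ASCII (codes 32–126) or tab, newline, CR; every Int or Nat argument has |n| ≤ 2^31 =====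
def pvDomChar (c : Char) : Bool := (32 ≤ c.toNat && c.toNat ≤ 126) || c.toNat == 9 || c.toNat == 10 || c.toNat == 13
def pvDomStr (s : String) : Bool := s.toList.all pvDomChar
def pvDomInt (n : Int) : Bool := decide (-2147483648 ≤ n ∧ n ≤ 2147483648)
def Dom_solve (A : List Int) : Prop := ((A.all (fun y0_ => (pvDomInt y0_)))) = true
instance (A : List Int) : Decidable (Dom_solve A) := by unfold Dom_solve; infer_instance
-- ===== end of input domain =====

-- B replaces A's inner pop-while scan by a binary search + one truncation on the always-sorted stack (alternative decomposition, same forward pass).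

-- ===== PORT A =====
-- the 'while stack and stack[-1] > A[i]: stack.pop()' loop (pop from the end)
def popLoopA (x : Int) (s : List Int) : List Int :=
  match h : s.getLast? with
  | none => s
  | some l => if l > x then popLoopA x s.dropLast else s
termination_by s.length
decreasing_by
  have hne : s ≠ [] := by intro he; subst he; simp at h
  have hp : 0 < s.length := List.length_pos_iff.mpr hne
  simp only [List.length_dropLast]; omega

def stepA (s : List Int) (x : Int) : List Int :=
  match s.getLast? with
  | none => [x]            -- unreachable: the stack is never empty at the branch test
  | some top =>
    if top ≤ x then s ++ [x]
    else if top > x then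
      -- last = stack[-1]; while …: pop; stack.append(last)
      popLoopA x s ++ [top]
    else s                 -- unreachable (trichotomy)

def solve (A : List Int) : Int :=
  match A with
  | [] => 0                -- Python raises IndexError on []: excluded by Pre_solve
  | a :: rest => ((rest.foldl stepA [a]).length : Int)

-- ===== PORT B =====
-- hand-written bisect_right loop: lo, hi = 0, len(stack); while lo < hi: …
def bisLoop (s : List Int) (x : Int) (lo hi : Nat) : Nat :=
  if lo < hi then
    let mid := (lo + hi) / 2
    if s.getD mid 0 ≤ x then bisLoop s x (mid + 1) hi else bisLoop s x lo mid
  else lo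
termination_by hi - lo
decreasing_by all_goals omega

def stepB (s : List Int) (x : Int) : List Int :=
  match s.getLast? with
  | none => [x]            -- unreachable
  | some last =>
    if last ≤ x then s ++ [x]
    else s.take (bisLoop s x 0 s.length) ++ [last]   -- del stack[lo:]; stack.append(last)

def solve_alt (A : List Int) : Int :=
  match A with
  | [] => 0                -- same corner, excluded by Pre_solve
  | a :: rest => ((rest.foldl stepB [a]).length : Int)

-- ===== PRECONDITION & SPEC =====
-- Pre_ excludes only the empty list, on which Python A raises IndexError (A[0]).
def Pre_solve (A : List Int) : Prop := A ≠ []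
instance (A : List Int) : Decidable (Pre_solve A) := by unfold Pre_solve; infer_instance
def pvWitness_solve : List Int := [3, 1, 2]

def Spec_solve (A : List Int) (out : Int) : Prop := out = solve_alt A
instance (A : List Int) (out : Int) : Decidable (Spec_solve A out) := by unfold Spec_solve; infer_instance

-- ===== CLAIM (what is proved, stated in full; the proofs are below) =====
def Claim_equal_solve : Prop := ∀ (A : List Int), Dom_solve A → Pre_solve A → Spec_solve A (solve A)

-- ===== LEMMAS AND PROOFS =====

theorem takeWhile_concat_neg {p : Int → Bool} (t : List Int) (a : Int) (hpa : p a = false) :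
    List.takeWhile p (t ++ [a]) = List.takeWhile p t := by
  induction t with
  | nil => simp [List.takeWhile, hpa]
  | cons h tt ih => by_cases ph : p h <;> simp [List.takeWhile, ph, ih]

theorem takeWhile_all {p : Int → Bool} (t : List Int) (h : ∀ b ∈ t, p b = true) :
    List.takeWhile p t = t := by
  induction t with
  | nil => rfl
  | cons b tt ih =>
    simp [List.takeWhile, h b (by simp), ih fun c hc => h c (by simp [hc])]

theorem popLoopA_nil (x : Int) : popLoopA x [] = [] := by
  rw [popLoopA.eq_def]; rfl

theorem popLoopA_concat (x a : Int) (t : List Int) :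
    popLoopA x (t ++ [a]) = if a > x then popLoopA x t else t ++ [a] := by
  rw [popLoopA.eq_def]
  simp only [List.dropLast_concat]
  split
  · next heq => simp at heq
  · next l heq =>
    rw [List.getLast?_concat] at heq
    cases heq
    rfl

-- On a sorted stack, the pop-from-the-end loop keeps exactly the prefix of elements ≤ x.
theorem popLoopA_eq_takeWhile (x : Int) (s : List Int)
    (hs : s.Pairwise (· ≤ ·)) : popLoopA x s = s.takeWhile (fun a => decide (a ≤ x)) := by
  induction s using List.reverseRecOn with
  | nil => simp [popLoopA_nil]
  | append_singleton t a ih =>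
    have ht : t.Pairwise (· ≤ ·) := (List.pairwise_append.mp hs).1
    have hall : ∀ b ∈ t, b ≤ a := fun b hb => (List.pairwise_append.mp hs).2.2 b hb a (by simp)
    rw [popLoopA_concat]
    by_cases hax : a > x
    · rw [if_pos hax, ih ht, takeWhile_concat_neg t a (by simp; omega)]
    · rw [if_neg hax, takeWhile_all]
      intro b hb
      rcases List.mem_append.mp hb with hb' | hb'
      · simp; exact le_trans (hall b hb') (by omega)
      · simp at hb'; subst hb'; simp; omega

-- Pointwise characterization of the takeWhile-prefix length on a sorted list.
theorem sorted_getD_iff (x : Int) (s : List Int) (hs : s.Pairwise (· ≤ ·)) (i : Nat)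
    (hi : i < s.length) :
    (s.getD i 0 ≤ x ↔ i < (s.takeWhile (fun a => decide (a ≤ x))).length) := by
  induction s generalizing i with
  | nil => simp at hi
  | cons h t ih =>
    by_cases hhx : h ≤ x
    · cases i with
      | zero => simpa [List.takeWhile, hhx]
      | succ j =>
        have := ih (List.Pairwise.sublist (List.sublist_cons_self h t) hs) j (by simpa using hi)
        simpa [List.takeWhile, hhx] using this
    · have hall : ∀ b ∈ t, ¬ b ≤ x := by
        intro b hb hb'
        exact hhx (le_trans (List.rel_of_pairwise_cons hs hb) hb')
      cases i with
      | zero => simpa [List.takeWhile, hhx]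
      | succ j =>
        have hjlen : j < t.length := by simpa using hi
        have hmem : t.getD j 0 ∈ t := by
          rw [List.getD_eq_getElem _ _ hjlen]; exact List.getElem_mem _
        have hnb := hall _ hmem
        simp only [List.getD_cons_succ, List.takeWhile_cons, hhx]
        simp [List.getD] at hnb ⊢
        omega

-- Binary-search correctness: bisLoop computes that prefix length.
theorem bisLoop_eq (x : Int) (s : List Int) (hs : s.Pairwise (· ≤ ·)) :
    ∀ (lo hi : Nat), hi ≤ s.length →
      lo ≤ (s.takeWhile (fun a => decide (a ≤ x))).length →
      (s.takeWhile (fun a => decide (a ≤ x))).length ≤ hi →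
      bisLoop s x lo hi = (s.takeWhile (fun a => decide (a ≤ x))).length := by
  intro lo hi
  induction hlh : hi - lo using Nat.strong_induction_on generalizing lo hi with
  | _ d ih =>
    intro hhi hlo hc
    subst hlh
    rw [bisLoop]
    by_cases h : lo < hi
    · simp only [h, if_true]
      have hmid : (lo + hi) / 2 < s.length := by omega
      by_cases hm : s.getD ((lo + hi) / 2) 0 ≤ x
      · have := (sorted_getD_iff x s hs _ hmid).mp hm
        simp only [hm, if_true]
        exact ih (hi - ((lo + hi) / 2 + 1)) (by omega) _ _ rfl hhi (by omega) hc
      · have hnm : ¬ ((lo + hi) / 2 < (s.takeWhile (fun a => decide (a ≤ x))).length) :=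
          fun hlt => hm ((sorted_getD_iff x s hs _ hmid).mpr hlt)
        simp only [hm, if_false]
        exact ih ((lo + hi) / 2 - lo) (by omega) _ _ rfl (by omega) hlo (by omega)
    · simp only [h, if_false]
      omega

-- One step of A equals one step of B on a sorted stack.
theorem stepA_eq_stepB (s : List Int) (x : Int) (hs : s.Pairwise (· ≤ ·)) :
    stepA s x = stepB s x := by
  unfold stepA stepB
  cases hl : s.getLast? with
  | none => rfl
  | some top =>
    by_cases htx : top ≤ x
    · simp [htx]
    · have htx' : top > x := by omega
      simp only [htx, if_false, htx', if_true]
      rw [popLoopA_eq_takeWhile x s hs,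
        bisLoop_eq x s hs 0 s.length le_rfl (Nat.zero_le _)
          (by simpa using (List.takeWhile_sublist _ (l := s)).length_le),
        (List.prefix_iff_eq_take.mp (List.takeWhile_prefix _)).symm]

-- every element of a sorted non-empty stack is ≤ its last element
theorem le_getLast_of_sorted (s : List Int) (hs : s.Pairwise (· ≤ ·)) (hne : s ≠ [])
    (top : Int) (hl : s.getLast? = some top) : ∀ b ∈ s, b ≤ top := by
  intro b hb
  have hsl : s.dropLast ++ [s.getLast hne] = s := List.dropLast_append_getLast hne
  have hlast : s.getLast hne = top := by
    have h2 : s.getLast? = some (s.getLast hne) := List.getLast?_eq_some_getLast hne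
    rw [h2] at hl; exact Option.some.inj hl
  rw [← hsl] at hs hb
  rcases List.mem_append.mp hb with hb' | hb'
  · exact hlast ▸ (List.pairwise_append.mp hs).2.2 b hb' _ (by simp)
  · simp at hb'; subst hb'; exact le_of_eq hlast

-- B's step preserves sortedness and non-emptiness of the stack.
theorem stepB_sorted (s : List Int) (x : Int) (hs : s.Pairwise (· ≤ ·)) (hne : s ≠ []) :
    (stepB s x).Pairwise (· ≤ ·) ∧ stepB s x ≠ [] := by
  unfold stepB
  cases hl : s.getLast? with
  | none => exact absurd (List.getLast?_eq_none_iff.mp hl) hne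
  | some top =>
    have htop : ∀ b ∈ s, b ≤ top := le_getLast_of_sorted s hs hne top hl
    by_cases htx : top ≤ x
    · simp only [htx, if_true]
      refine ⟨List.pairwise_append.mpr ⟨hs, List.pairwise_singleton _ _, ?_⟩, by simp⟩
      intro b hb c hc; simp at hc; subst hc; exact le_trans (htop b hb) htx
    · simp only [htx, if_false]
      refine ⟨List.pairwise_append.mpr ⟨List.Pairwise.sublist (List.take_sublist _ _) hs,
        List.pairwise_singleton _ _, ?_⟩, by simp⟩
      intro b hb c hc; simp at hc; subst hc
      exact htop b (List.mem_of_mem_take hb)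

-- Folding the two steps from a sorted non-empty stack yields the same final stack.
theorem foldl_stepA_eq (rest : List Int) :
    ∀ (s : List Int), s.Pairwise (· ≤ ·) → s ≠ [] →
      rest.foldl stepA s = rest.foldl stepB s := by
  induction rest with
  | nil => intro _ _ _; rfl
  | cons x r ih =>
    intro s hs hne
    have h12 := stepB_sorted s x hs hne
    simp only [List.foldl_cons, stepA_eq_stepB s x hs]
    exact ih _ h12.1 h12.2

-- ===== VERDICT (by name: the statement is the Claim_ definition above) =====
theorem solve_spec : Claim_equal_solve := by
  intro A _ hpre
  cases A with
  | nil => exact absurd rfl hpre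
  | cons a rest =>
    show ((rest.foldl stepA [a]).length : Int) = ((rest.foldl stepB [a]).length : Int)
    rw [foldl_stepA_eq rest [a] (List.pairwise_singleton _ _) (by simp)]
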